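-- pv_equiv track=rewrite | github.com/solo21-12/A2SV-dream | codeforces/A_Boy_or_Girl.py | boyOrGirl
-- ===== SOURCE A (Python) =====
-- def boyOrGirl(word: str) -> str:
--     counter = {}
--     distinct = 0
--     for i in word:
--         if i in counter:
--             counter[i] += 1
--             distinct -= 1
--         counter[i] = 1
--         distinct += 1
--
--     return "CHAT WITH HER!" if distinct % 2 == 0 else "IGNORE HIM!"
-- ===== SOURCE B (Python) =====
-- def boyOrGirl(word: str) -> str:
--     if word == "":
--         return "CHAT WITH HER!"
--     sub = boyOrGirl(word[1:].replace(word[0], ""))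
--     return "IGNORE HIM!" if sub == "CHAT WITH HER!" else "CHAT WITH HER!"
-- ===== Notes on version B (the rewrite author's own statement) =====
-- stated objective: alternative
-- what changed: Replaces A's counting loop (dict + distinct tally, then parity test) by a recursion that never counts: each step strips every occurrence of the first character with str.replace and flips the answer, so the final string encodes the parity of the distinct-character count directly.
import Mathlib
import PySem

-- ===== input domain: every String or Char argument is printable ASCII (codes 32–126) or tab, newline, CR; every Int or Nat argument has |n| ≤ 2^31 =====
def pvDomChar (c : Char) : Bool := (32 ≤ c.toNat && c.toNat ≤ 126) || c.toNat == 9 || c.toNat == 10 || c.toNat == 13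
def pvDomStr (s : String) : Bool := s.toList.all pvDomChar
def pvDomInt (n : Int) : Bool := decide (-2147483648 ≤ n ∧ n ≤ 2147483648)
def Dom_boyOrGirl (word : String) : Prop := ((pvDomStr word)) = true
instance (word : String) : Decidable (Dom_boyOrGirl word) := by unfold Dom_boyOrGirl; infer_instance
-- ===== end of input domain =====

-- B replaces A's counting loop (dict + distinct tally + parity test) by a recursion that
-- strips all occurrences of the first character and flips the answer at each step (alternative).

-- ===== PORT A =====
def boyOrGirl (word : String) : String :=
  let st := word.toList.foldl
    (fun (st : PySem.Dict Char Int × Int) i =>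
      let st := if st.1.contains i then (st.1.insert i (st.1.getD i 0 + 1), st.2 - 1) else st
      (st.1.insert i 1, st.2 + 1))
    (PySem.Dict.empty, 0)
  if st.2 % 2 == 0 then "CHAT WITH HER!" else "IGNORE HIM!"

-- ===== PORT B =====
-- word[1:].replace(word[0], "") on word = c :: rest is rest with every c removed:
-- exact, since str.replace with empty replacement deletes each occurrence of c.
def boyOrGirlAltGo (l : List Char) : String :=
  match l with
  | [] => "CHAT WITH HER!"
  | c :: rest =>
    let sub := boyOrGirlAltGo (rest.filter (fun x => x != c))
    if sub == "CHAT WITH HER!" then "IGNORE HIM!" else "CHAT WITH HER!"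
termination_by l.length
decreasing_by
  simpa using Nat.lt_succ_of_le (List.length_filter_le _ rest)

def boyOrGirl_alt (word : String) : String :=
  boyOrGirlAltGo word.toList

-- ===== PRECONDITION & SPEC =====
def Spec_boyOrGirl (word : String) (out : String) : Prop := out = boyOrGirl_alt word
instance (word : String) (out : String) : Decidable (Spec_boyOrGirl word out) := by unfold Spec_boyOrGirl; infer_instance

-- ===== CLAIM =====
def Claim_equal_boyOrGirl : Prop := ∀ (word : String), Dom_boyOrGirl word → Spec_boyOrGirl word (boyOrGirl word)

-- ===== LEMMAS AND PROOFS =====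

-- A's loop invariant: the running tally equals the number of keys of the counter dict.
theorem boyOrGirl_loop (l : List Char) :
    ∀ (d : PySem.Dict Char Int) (n : Int), n = (d.keys.length : Int) →
    (l.foldl
      (fun (st : PySem.Dict Char Int × Int) i =>
        let st := if st.1.contains i then (st.1.insert i (st.1.getD i 0 + 1), st.2 - 1) else st
        (st.1.insert i 1, st.2 + 1))
      (d, n)).2 = ((PySem.Set.update d.keys l).length : Int) := by
  induction l with
  | nil => intro d n hn; simpa [PySem.Set.update] using hn
  | cons c l ih =>
    intro d n hn
    simp only [List.foldl_cons]
    by_cases hc : d.contains c = true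
    · have h1 : (d.insert c (d.getD c 0 + 1)).contains c = true := by simp
      have hkeys : ((d.insert c (d.getD c 0 + 1)).insert c 1).keys = d.keys := by
        rw [PySem.Dict.keys_insert_of_contains (d.insert c (d.getD c 0 + 1)) 1 h1,
            PySem.Dict.keys_insert_of_contains d (d.getD c 0 + 1) hc]
      have hadd : PySem.Set.add d.keys c = d.keys := by
        have : c ∈ d.keys := (PySem.Dict.contains_iff_mem_keys _ _).mp hc
        simp [PySem.Set.add, PySem.Set.contains, this]
      simp only [hc, if_true]
      rw [ih _ _ (by simp [hkeys, hn])]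
      simp [PySem.Set.update, hkeys, hadd]
    · have hc' : d.contains c = false := by simpa using hc
      have hkeys : (d.insert c 1).keys = d.keys ++ [c] :=
        PySem.Dict.keys_insert_of_not_contains d 1 hc'
      have hadd : PySem.Set.add d.keys c = d.keys ++ [c] := by
        have : c ∉ d.keys := fun h => hc ((PySem.Dict.contains_iff_mem_keys _ _).mpr h)
        simp [PySem.Set.add, PySem.Set.contains, this]
      simp only [hc', Bool.false_eq_true, if_false]
      rw [ih _ _ (by simp [hkeys, hn])]
      simp [PySem.Set.update, hkeys, hadd]

-- The dedup list of A's counter keys has as many elements as the finset of characters.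
theorem ofList_length_eq_card (l : List Char) :
    (PySem.Set.ofList l).length = l.toFinset.card := by
  have hnd : (PySem.Set.ofList l).Nodup := PySem.Set.nodup_ofList l
  have hset : (PySem.Set.ofList l).toFinset = l.toFinset := by
    ext x; simp [PySem.Set.mem_ofList]
  calc (PySem.Set.ofList l).length = (PySem.Set.ofList l).toFinset.card :=
        (List.toFinset_card_of_nodup hnd).symm
    _ = l.toFinset.card := by rw [hset]

-- Removing all copies of the head drops the distinct count by exactly one.
theorem card_cons_filter (c : Char) (rest : List Char) :
    (c :: rest).toFinset.card = (rest.filter (fun x => x != c)).toFinset.card + 1 := by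
  have h1 : (c :: rest).toFinset = insert c (rest.filter (fun x => x != c)).toFinset := by
    ext x
    simp only [List.toFinset_cons, Finset.mem_insert, List.mem_toFinset, List.mem_filter,
      bne_iff_ne]
    constructor
    · rintro (h | h)
      · exact Or.inl h
      · by_cases hx : x = c
        · exact Or.inl hx
        · exact Or.inr ⟨h, hx⟩
    · rintro (h | ⟨h, _⟩)
      · exact Or.inl h
      · exact Or.inr h
  have h2 : c ∉ (rest.filter (fun x => x != c)).toFinset := by
    simp [List.mem_filter]
  rw [h1, Finset.card_insert_of_notMem h2]

-- B's recursion computes the parity of the number of distinct characters.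
theorem boyOrGirlAltGo_eq (n : Nat) : ∀ (l : List Char), l.length ≤ n →
    boyOrGirlAltGo l = if l.toFinset.card % 2 == 0 then "CHAT WITH HER!" else "IGNORE HIM!" := by
  induction n with
  | zero =>
    intro l hl
    have : l = [] := List.eq_nil_of_length_eq_zero (Nat.le_zero.mp hl)
    subst this; simp [boyOrGirlAltGo]
  | succ n ih =>
    intro l hl
    match l with
    | [] => simp [boyOrGirlAltGo]
    | c :: rest =>
      rw [boyOrGirlAltGo]
      have hlen : (rest.filter (fun x => x != c)).length ≤ n :=
        le_trans (List.length_filter_le _ rest) (Nat.le_of_succ_le_succ hl)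
      rw [ih _ hlen, card_cons_filter c rest]
      generalize (rest.filter (fun x => x != c)).toFinset.card = k
      rcases (by omega : k % 2 = 0 ∨ k % 2 = 1) with h0 | h0
      · have h1 : (k + 1) % 2 = 1 := by omega
        simp [h0, h1]
      · have h1 : (k + 1) % 2 = 0 := by omega
        simp [h0, h1]

-- ===== VERDICT =====
theorem boyOrGirl_spec : Claim_equal_boyOrGirl := by
  intro word _
  show boyOrGirl word = boyOrGirl_alt word
  show (if ((word.toList.foldl
      (fun (st : PySem.Dict Char Int × Int) i =>
        let st := if st.1.contains i then (st.1.insert i (st.1.getD i 0 + 1), st.2 - 1) else st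
        (st.1.insert i 1, st.2 + 1))
      (PySem.Dict.empty, 0)).2 % 2 == 0) = true then "CHAT WITH HER!" else "IGNORE HIM!") = _
  rw [boyOrGirl_loop word.toList PySem.Dict.empty 0 (by simp)]
  rw [boyOrGirl_alt, boyOrGirlAltGo_eq word.toList.length word.toList le_rfl]
  have hup : PySem.Set.update (PySem.Dict.empty : PySem.Dict Char Int).keys word.toList
      = PySem.Set.ofList word.toList := by
    simp [PySem.Set.update, PySem.Set.ofList_eq_foldl, PySem.Dict.empty]
  rw [hup, ofList_length_eq_card]
  rcases Nat.even_or_odd (word.toList.toFinset.card) with he | ho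
  · have h0 : word.toList.toFinset.card % 2 = 0 := Nat.even_iff.mp he
    have h1 : ((word.toList.toFinset.card : Int)) % 2 = 0 := by omega
    simp [h0, h1]
  · have h0 : word.toList.toFinset.card % 2 = 1 := Nat.odd_iff.mp ho
    have h1 : ((word.toList.toFinset.card : Int)) % 2 = 1 := by omega
    simp [h0, h1]
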